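-- pv_equiv track=rewrite | github.com/sunjae98/Algorithm-study | test1/문제2/김선재.py | solution
-- ===== SOURCE A (Python) =====
-- def solution(d, budget):
--     answer = 0
--
--     d.sort()
--
--     for i in range(len(d)):
--         if(budget >= d[i]):
--             budget -= d[i]
--             answer += 1
--
--     return answer
-- ===== SOURCE B (Python) =====
-- def solution(d, budget):
--     d.sort()  # same in-place sort as A
--     # Stage 1: build the full prefix-sum table of the sorted costs.
--     prefixes = []
--     total = 0
--     for x in d:
--         total += x
--         prefixes.append(total)
--     # Stage 2: the answer is the index of the first prefix sum exceeding the budget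
--     # (the greedy takes exactly that longest feasible prefix), or len(d) if none does.
--     return next((i for i, s in enumerate(prefixes) if s > budget), len(prefixes))
-- ===== Notes on version B (the rewrite author's own statement) =====
-- stated objective: alternative
-- what changed: Replaces A's single-pass running-subtraction greedy (mutating the budget and counting) with two staged passes: first materialise the whole prefix-sum table of the sorted costs, then return the index of the first prefix sum that exceeds the budget; equal because on a sorted list the first prefix-sum violation is exactly where the greedy stops taking items.
import Mathlib
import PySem

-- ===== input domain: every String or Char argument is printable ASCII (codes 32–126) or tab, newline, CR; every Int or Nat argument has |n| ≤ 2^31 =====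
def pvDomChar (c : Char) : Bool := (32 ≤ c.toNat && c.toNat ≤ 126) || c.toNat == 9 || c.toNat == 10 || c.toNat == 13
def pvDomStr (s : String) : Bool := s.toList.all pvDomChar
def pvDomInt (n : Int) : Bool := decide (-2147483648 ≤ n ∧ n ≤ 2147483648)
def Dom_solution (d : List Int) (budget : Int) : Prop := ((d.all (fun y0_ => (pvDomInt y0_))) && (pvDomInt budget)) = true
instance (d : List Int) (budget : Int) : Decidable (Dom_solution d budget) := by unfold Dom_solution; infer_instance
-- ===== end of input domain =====

-- B replaces A's single-pass running-subtraction greedy with two staged passes: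
-- build the full prefix-sum table of the sorted costs, then return the index of the
-- first prefix sum exceeding the budget (alternative decomposition; both sort d in
-- place in Python — the equivalence proved here is about the return value only).

-- ===== PORT A =====
-- for i in range(len(d)): if budget >= d[i]: budget -= d[i]; answer += 1
def solution (d : List Int) (budget : Int) : Int :=
  let ds := PySem.List.sorted d (fun x => x) false
  (ds.foldl (fun (st : Int × Int) x =>
      if st.1 ≥ x then (st.1 - x, st.2 + 1) else st) (budget, (0 : Int))).2

-- ===== PORT B =====
-- Stage 1: for x in d: total += x; prefixes.append(total)
def buildPrefixes (total : Int) : List Int → List Int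
  | [] => []
  | x :: rest => (total + x) :: buildPrefixes (total + x) rest

-- Stage 2: next((i for i, s in enumerate(prefixes) if s > budget), len(prefixes))
-- (i carries the running enumeration index; at the end it equals the length)
def firstExceed (budget : Int) (i : Int) : List Int → Int
  | [] => i
  | s :: rest => if s > budget then i else firstExceed budget (i + 1) rest

def solution_alt (d : List Int) (budget : Int) : Int :=
  firstExceed budget 0 (buildPrefixes 0 (PySem.List.sorted d (fun x => x) false))

-- ===== PRECONDITION & SPEC =====
def Spec_solution (d : List Int) (budget : Int) (out : Int) : Prop := out = solution_alt d budget
instance (d : List Int) (budget : Int) (out : Int) : Decidable (Spec_solution d budget out) := by unfold Spec_solution; infer_instance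

-- ===== CLAIM (what is proved, stated in full; the proofs are below) =====
def Claim_equal_solution : Prop := ∀ (d : List Int) (budget : Int), Dom_solution d budget → Spec_solution d budget (solution d budget)

-- ===== LEMMAS AND PROOFS =====

-- If every remaining item exceeds the remaining budget, A's fold changes nothing.
lemma foldl_none (l : List Int) (b a : Int) (h : ∀ y ∈ l, ¬ b ≥ y) :
    (l.foldl (fun (st : Int × Int) x =>
      if st.1 ≥ x then (st.1 - x, st.2 + 1) else st) (b, a)) = (b, a) := by
  induction l with
  | nil => rfl
  | cons x t ih =>
    simp only [List.foldl_cons]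
    rw [if_neg (h x (List.mem_cons_self))]
    exact ih (fun y hy => h y (List.mem_cons_of_mem _ hy))

-- Core invariant: on a ≤-sorted list, A's subtraction greedy with budget b - s
-- equals searching the prefix-sum table (accumulated sum s, counter a) for the
-- first sum exceeding b.
lemma greedy_eq (l : List Int) (b : Int) : ∀ s a : Int, l.Pairwise (· ≤ ·) →
    (l.foldl (fun (st : Int × Int) x =>
      if st.1 ≥ x then (st.1 - x, st.2 + 1) else st) (b - s, a)).2
      = firstExceed b a (buildPrefixes s l) := by
  induction l with
  | nil => intro s a _; rfl
  | cons x t ih =>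
    intro s a hp
    have hpt := (List.pairwise_cons.mp hp).2
    have hx := (List.pairwise_cons.mp hp).1
    simp only [List.foldl_cons, buildPrefixes, firstExceed]
    by_cases h : s + x > b
    · rw [if_neg (by omega), if_pos h]
      have : ∀ y ∈ t, ¬ (b - s) ≥ y := fun y hy => by have := hx y hy; omega
      rw [foldl_none t (b - s) a this]
    · rw [if_pos (by omega), if_neg h]
      have : b - s - x = b - (s + x) := by ring
      rw [this]
      exact ih (s + x) (a + 1) hpt

-- ===== VERDICT (by name: the statement is the Claim_ definition above) =====
theorem solution_spec : Claim_equal_solution := by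
  intro d budget _
  unfold Spec_solution solution solution_alt
  have h := greedy_eq (PySem.List.sorted d (fun x => x) false) budget 0 0
    (PySem.List.sorted_pairwise d (fun x => x))
  simpa using h
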